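-- pv_equiv track=rewrite | github.com/Xvezda/python-maskprocessor | maskprocessor/__init__.py | expand
-- ===== SOURCE A (Python) =====
-- import string
--
-- charset_l = string.ascii_lowercase
--
-- charset_u = string.ascii_uppercase
--
-- charset_d = string.digits
--
-- charset_s = ' ' + string.punctuation
--
-- charset_a = charset_l + charset_u + charset_d + charset_s
--
-- charset_b = ''.join([chr(v) for v in range(0x00, 0xff+1)])
--
-- charset_1 = ''
--
-- charset_2 = ''
--
-- charset_3 = ''
--
-- charset_4 = ''
--
-- def expand(mask):
--     if not mask:
--         return []
--     charsets = []
--     # Parse mask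
--     it = iter(mask)
--     while True:
--         try:
--             c = next(it)
--         except StopIteration:
--             break
--         if c == '?':
--             try:
--                 c2 = next(it)
--             except StopIteration:
--                 break
--             if c2 == 'l':
--                 charsets += [charset_l]
--             elif c2 == 'u':
--                 charsets += [charset_u]
--             elif c2 == 'd':
--                 charsets += [charset_d]
--             elif c2 == 's':
--                 charsets += [charset_s]
--             elif c2 == 'a':
--                 charsets += [charset_a]
--             elif c2 == 'b':
--                 charsets += [charset_b]
--             elif c2 == '1':
--                 charsets += [charset_1]
--             elif c2 == '2':
--                 charsets += [charset_2]
--             elif c2 == '3':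
--                 charsets += [charset_3]
--             elif c2 == '4':
--                 charsets += [charset_4]
--             elif c2 == '?':
--                 charsets += ['?']
--             else:
--                 raise SyntaxError("invalid character '%s'" % (c2,))
--         else:
--             charsets += [c]
--     return charsets
-- ===== SOURCE B (Python) =====
-- import string
--
-- charset_l = string.ascii_lowercase
-- charset_u = string.ascii_uppercase
-- charset_d = string.digits
-- charset_s = ' ' + string.punctuation
-- charset_a = charset_l + charset_u + charset_d + charset_s
-- charset_b = ''.join([chr(v) for v in range(0x00, 0xff + 1)])
-- charset_1 = ''
-- charset_2 = ''
-- charset_3 = ''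
-- charset_4 = ''
--
-- _TABLE = {
--     'l': charset_l, 'u': charset_u, 'd': charset_d, 's': charset_s,
--     'a': charset_a, 'b': charset_b, '1': charset_1, '2': charset_2,
--     '3': charset_3, '4': charset_4, '?': '?',
-- }
--
-- def _tokens(mask):
--     # First pass: cut the mask into tokens, '?x' pairs or single literals;
--     # a dangling trailing '?' yields no token.
--     toks = []
--     i, n = 0, len(mask)
--     while i < n:
--         if mask[i] == '?':
--             if i + 1 == n:
--                 break
--             toks.append(mask[i:i + 2])
--             i += 2
--         else:
--             toks.append(mask[i])
--             i += 1
--     return toks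
--
-- def _resolve(tok):
--     if len(tok) == 2:
--         try:
--             return _TABLE[tok[1]]
--         except KeyError:
--             raise SyntaxError("invalid character '%s'" % (tok[1],))
--     return tok
--
-- def expand(mask):
--     # Second pass: map each token to its charset / literal.
--     return [_resolve(t) for t in _tokens(mask)]
-- ===== Notes on version B (the rewrite author's own statement) =====
-- stated objective: alternative
-- what changed: A's single iterator while-loop with an 11-branch elif chain is replaced by a two-pass decomposition: one pass cuts the mask into '?x'/literal tokens (dropping a dangling trailing '?'), a second pass maps each token through a charset dict.
-- outside the precondition, e.g. on expand('?x'): A raises SyntaxError, B raises SyntaxError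
import Mathlib
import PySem

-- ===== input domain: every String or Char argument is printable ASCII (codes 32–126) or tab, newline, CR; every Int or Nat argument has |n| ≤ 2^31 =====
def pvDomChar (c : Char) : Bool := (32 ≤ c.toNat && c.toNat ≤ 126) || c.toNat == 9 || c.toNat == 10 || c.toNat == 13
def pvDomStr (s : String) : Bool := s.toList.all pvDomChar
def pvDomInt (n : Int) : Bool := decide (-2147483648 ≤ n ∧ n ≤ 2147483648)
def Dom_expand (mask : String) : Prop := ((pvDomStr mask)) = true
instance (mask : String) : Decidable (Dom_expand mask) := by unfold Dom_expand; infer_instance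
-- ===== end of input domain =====

-- B replaces A's single iterator while-loop with a two-pass decomposition (tokenize into '?x'/literal tokens, then a table lookup); objective: alternative, same cost.

-- module constants (string.ascii_lowercase etc.)
def charset_l : String := "abcdefghijklmnopqrstuvwxyz"
def charset_u : String := "ABCDEFGHIJKLMNOPQRSTUVWXYZ"
def charset_d : String := "0123456789"
def charset_s : String := " !\"#$%&'()*+,-./:;<=>?@[\\]^_`{|}~"
def charset_a : String := charset_l ++ charset_u ++ charset_d ++ charset_s
def charset_b : String := String.ofList ((List.range 256).map (fun v => Char.ofNat v))
def charset_1 : String := ""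
def charset_2 : String := ""
def charset_3 : String := ""
def charset_4 : String := ""

-- ===== PORT A =====
-- A's while-loop over the iterator; the SyntaxError branch (excluded by Pre_expand) returns the accumulator.
def expandLoopA : List String → List Char → List String
  | charsets, [] => charsets
  | charsets, c :: it =>
    if c = '?' then
      match it with
      | [] => charsets
      | c2 :: it2 =>
        if c2 = 'l' then expandLoopA (charsets ++ [charset_l]) it2
        else if c2 = 'u' then expandLoopA (charsets ++ [charset_u]) it2
        else if c2 = 'd' then expandLoopA (charsets ++ [charset_d]) it2
        else if c2 = 's' then expandLoopA (charsets ++ [charset_s]) it2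
        else if c2 = 'a' then expandLoopA (charsets ++ [charset_a]) it2
        else if c2 = 'b' then expandLoopA (charsets ++ [charset_b]) it2
        else if c2 = '1' then expandLoopA (charsets ++ [charset_1]) it2
        else if c2 = '2' then expandLoopA (charsets ++ [charset_2]) it2
        else if c2 = '3' then expandLoopA (charsets ++ [charset_3]) it2
        else if c2 = '4' then expandLoopA (charsets ++ [charset_4]) it2
        else if c2 = '?' then expandLoopA (charsets ++ ["?"]) it2
        else charsets  -- raise SyntaxError (outside Pre_expand)
    else expandLoopA (charsets ++ [String.ofList [c]]) it

def expand (mask : String) : List String :=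
  if mask = "" then [] else expandLoopA [] mask.toList

-- ===== PORT B =====
-- first pass: tokens, '?x' pairs or single literals; a dangling trailing '?' yields no token
def expandTokens : List Char → List (List Char)
  | [] => []
  | c :: rest =>
    if c = '?' then
      match rest with
      | [] => []
      | c2 :: rest2 => ['?', c2] :: expandTokens rest2
    else [c] :: expandTokens rest

-- second pass: dict lookup (in _TABLE's insertion order); KeyError→SyntaxError excluded by Pre_expand
def expandResolve (tok : List Char) : String :=
  match tok with
  | [_, c2] =>
    if c2 = 'l' then charset_l
    else if c2 = 'u' then charset_u
    else if c2 = 'd' then charset_d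
    else if c2 = 's' then charset_s
    else if c2 = 'a' then charset_a
    else if c2 = 'b' then charset_b
    else if c2 = '1' then charset_1
    else if c2 = '2' then charset_2
    else if c2 = '3' then charset_3
    else if c2 = '4' then charset_4
    else if c2 = '?' then "?"
    else ""  -- raise SyntaxError (outside Pre_expand)
  | t => String.ofList t

def expand_alt (mask : String) : List String :=
  (expandTokens mask.toList).map expandResolve

-- ===== PRECONDITION & SPEC =====
-- the valid charset codes that may follow a '?'
def maskOkCode (c : Char) : Bool :=
  c = 'l' || c = 'u' || c = 'd' || c = 's' || c = 'a' || c = 'b' ||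
  c = '1' || c = '2' || c = '3' || c = '4' || c = '?'

-- length of the run of consecutive '?' immediately before position i
def qRun (l : List Char) (i : Nat) : Nat :=
  ((l.take i).reverse.takeWhile (fun c => c == '?')).length

-- Pre_expand excludes exactly the masks on which A raises SyntaxError: a character standing right
-- after an ODD run of consecutive '?' is consumed as a charset code, so it must be a valid code.
def Pre_expand (mask : String) : Prop :=
  ∀ i < mask.toList.length,
    qRun mask.toList i % 2 = 1 → maskOkCode (mask.toList.getD i ' ') = true
instance (mask : String) : Decidable (Pre_expand mask) := by unfold Pre_expand; infer_instance

def pvWitness_expand : String := "?l"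

def Spec_expand (mask : String) (out : List String) : Prop := out = expand_alt mask
instance (mask : String) (out : List String) : Decidable (Spec_expand mask out) := by unfold Spec_expand; infer_instance

-- ===== CLAIM (what is proved, stated in full; the proofs are below) =====
def Claim_equal_expand : Prop := ∀ (mask : String), Dom_expand mask → Pre_expand mask → Spec_expand mask (expand mask)

-- ===== LEMMAS AND PROOFS =====

-- recursive characterisation of the masks accepted by Pre_expand (proof-side only)
def maskOk : List Char → Bool
  | [] => true
  | c :: rest =>
    if c = '?' then
      match rest with
      | [] => true
      | c2 :: rest2 => maskOkCode c2 && maskOk rest2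
    else maskOk rest

theorem qRun_zero (l : List Char) : qRun l 0 = 0 := by simp [qRun]

theorem qRun_one_q (l : List Char) : qRun ('?' :: l) 1 = 1 := by simp [qRun]

theorem qRun_succ_lit (c : Char) (l : List Char) (i : Nat) (hc : ¬ c = '?') :
    qRun (c :: l) (i + 1) = qRun l i := by
  have hpc : (c == '?') = false := by simpa using hc
  simp only [qRun, List.take_succ_cons, List.reverse_cons, List.takeWhile_append]
  split_ifs with h
  · have hnil : List.takeWhile (fun x => x == '?') [c] = ([] : List Char) := by simp [hpc]
    rw [hnil, List.append_nil, h]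
  · rfl

theorem qRun_parity_two (c2 : Char) (l : List Char) (i : Nat) :
    qRun ('?' :: c2 :: l) (i + 2) % 2 = qRun l i % 2 := by
  have ht : ('?' :: c2 :: l).take (i + 2) = '?' :: c2 :: l.take i := rfl
  have h2 : ('?' :: c2 :: l.take i).reverse = (l.take i).reverse ++ [c2, '?'] := by
    simp
  simp only [qRun, ht, h2, List.takeWhile_append]
  split_ifs with h
  · have hk : (List.takeWhile (fun c => c == '?') [c2, '?']).length = 0 ∨
        (List.takeWhile (fun c => c == '?') [c2, '?']).length = 2 := by
      by_cases hcq : c2 = '?' <;> simp [hcq]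
    rw [List.length_append]
    rcases hk with hk | hk <;> rw [hk] <;> omega
  · rfl

theorem maskOk_iff (l : List Char) :
    maskOk l = true ↔
      (∀ i < l.length, qRun l i % 2 = 1 → maskOkCode (l.getD i ' ') = true) := by
  induction l using maskOk.induct with
  | case1 => simp [maskOk]
  | case2 =>
    constructor
    · intro _ i hi hq
      have hi' : i = 0 := by simpa using hi
      subst hi'
      rw [qRun_zero] at hq
      omega
    · intro _
      decide
  | case3 c2 rest2 ih =>
    have hmk : maskOk ('?' :: c2 :: rest2) = (maskOkCode c2 && maskOk rest2) := rfl
    rw [hmk, Bool.and_eq_true]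
    constructor
    · rintro ⟨h1, h2⟩ i hi hq
      match i with
      | 0 => rw [qRun_zero] at hq; omega
      | 1 => simpa using h1
      | (j + 2) =>
        rw [qRun_parity_two] at hq
        simpa using (ih.mp h2) j (by simpa using hi) hq
    · intro hP
      refine ⟨?_, ih.mpr ?_⟩
      · simpa using hP 1 (by simp) (by rw [qRun_one_q])
      · intro i hi hq
        simpa using hP (i + 2) (by simpa using hi) (by rw [qRun_parity_two]; exact hq)
  | case4 c rest hc ih =>
    rw [maskOk.eq_def]
    simp only [if_neg hc]
    constructor
    · intro h i hi hq
      match i with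
      | 0 => rw [qRun_zero] at hq; omega
      | (j + 1) =>
        rw [qRun_succ_lit c rest j hc] at hq
        simpa using (ih.mp h) j (by simpa using hi) hq
    · intro hP
      refine ih.mpr ?_
      intro i hi hq
      simpa using hP (i + 1) (by simpa using hi) (by rw [qRun_succ_lit c rest i hc]; exact hq)

theorem expandLoopA_eq (l : List Char) :
    ∀ acc : List String, maskOk l = true →
      expandLoopA acc l = acc ++ (expandTokens l).map expandResolve := by
  induction l using expandTokens.induct with
  | case1 => intro acc _; simp [expandLoopA, expandTokens]
  | case2 => intro acc _; simp [expandLoopA, expandTokens]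
  | case3 c2 rest2 ih =>
    intro acc hok
    have hok' : maskOkCode c2 = true ∧ maskOk rest2 = true := by
      simpa [maskOk] using hok
    obtain ⟨hc, hrest⟩ := hok'
    have hc' : c2 = 'l' ∨ c2 = 'u' ∨ c2 = 'd' ∨ c2 = 's' ∨ c2 = 'a' ∨ c2 = 'b' ∨
        c2 = '1' ∨ c2 = '2' ∨ c2 = '3' ∨ c2 = '4' ∨ c2 = '?' := by
      simpa [maskOkCode, or_assoc] using hc
    rcases hc' with h|h|h|h|h|h|h|h|h|h|h <;> subst h <;>
      simp [expandLoopA, expandTokens, expandResolve, ih _ hrest, List.append_assoc]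
  | case4 c rest hq ih =>
    intro acc hok
    rw [maskOk.eq_def] at hok; simp only [if_neg hq] at hok
    rw [expandLoopA.eq_def, expandTokens.eq_def]; simp only [if_neg hq]
    simp [ih _ hok, expandResolve, List.append_assoc]

-- ===== VERDICT (by name: the statement is the Claim_ definition above) =====
theorem expand_spec : Claim_equal_expand := by
  intro mask _ hpre
  have hok : maskOk mask.toList = true := (maskOk_iff mask.toList).mpr hpre
  unfold Spec_expand expand expand_alt
  split_ifs with h
  · subst h; rfl
  · exact (expandLoopA_eq mask.toList [] hok).trans (by simp)
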